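-- pv_equiv track=rewrite | github.com/cenhao/coding | lint/1500/1458.py | minimumSubmatrix
-- ===== SOURCE A (Python) =====
-- def minimumSubmatrix(arr):
--     r, c = len(arr), len(arr[0])
--     dp = [[0 for j in range(c)] for i in range(c)]
--
--     mn, init = 0, False
--     for i in range(r):
--         for j in range(c):
--             sm = 0
--             for k in range(j, -1, -1):
--                 sm += arr[i][k]
--                 tmp = dp[k][j] + sm
--                 dp[k][j] = min(0, tmp)
--
--                 if not init or tmp<mn:
--                     init = True
--                     mn = tmp
--
--     return mn
-- ===== SOURCE B (Python) =====
-- def minimumSubmatrix(arr):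
--     c = len(arr[0])
--     best = None
--     for t in range(len(arr)):
--         colsum = [0] * c
--         for b in range(t, len(arr)):
--             row = arr[b]
--             run = 0
--             for j in range(c):
--                 colsum[j] += row[j]
--                 run = min(run, 0) + colsum[j]
--                 if best is None or run < best:
--                     best = run
--     return best if best is not None else 0
-- ===== Notes on version B (the rewrite author's own statement) =====
-- stated objective: alternative
-- what changed: A keeps a per-(left,right)-column-pair vertical dp matrix updated row by row; B instead enumerates top/bottom row pairs, maintains a column-sum vector, and runs a 1D minimum-subarray (Kadane) scan over it, so the dp matrix and the inner downward left-endpoint scan disappear.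
import Mathlib
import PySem

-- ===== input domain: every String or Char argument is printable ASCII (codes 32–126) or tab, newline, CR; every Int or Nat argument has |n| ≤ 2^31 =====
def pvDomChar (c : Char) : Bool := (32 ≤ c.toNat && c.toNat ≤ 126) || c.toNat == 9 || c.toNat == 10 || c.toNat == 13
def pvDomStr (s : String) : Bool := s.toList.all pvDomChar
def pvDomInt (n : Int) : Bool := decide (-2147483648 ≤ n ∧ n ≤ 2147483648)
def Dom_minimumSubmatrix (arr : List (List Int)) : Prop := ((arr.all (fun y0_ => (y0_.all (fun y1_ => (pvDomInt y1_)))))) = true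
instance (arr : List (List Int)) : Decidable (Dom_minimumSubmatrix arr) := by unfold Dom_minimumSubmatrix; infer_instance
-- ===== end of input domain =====

-- B replaces A's per-row vertical dp over (left,right) column pairs by a top-row/bottom-row
-- column-sum sweep with a horizontal 1D minimum-subarray scan (alternative algorithm, same results).

-- ===== PORT A =====
-- Indexing arr[i][k] / dp[k][j] is in range and non-negative on every input Pre_ admits,
-- so it is ported with getD (exact there); Python's range(n) over non-negative bounds is List.range.

def dpGet (dp : List (List Int)) (k j : Nat) : Int := (dp.getD k []).getD j 0

def dpSet (dp : List (List Int)) (k j : Nat) (v : Int) : List (List Int) :=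
  dp.set k ((dp.getD k []).set j v)

-- for k in range(j, -1, -1): k runs j, j-1, …, 0 (structural recursion on k), sm accumulates
def innerA (row : List Int) (j : Nat) :
    Nat → Int → List (List Int) × Int × Bool → List (List Int) × Int × Bool
  | k, sm, (dp, mn, init) =>
    let sm' := sm + row.getD k 0
    let tmp := dpGet dp k j + sm'
    let dp' := dpSet dp k j (min 0 tmp)
    let st' : List (List Int) × Int × Bool :=
      if !init || tmp < mn then (dp', tmp, true) else (dp', mn, init)
    match k with
    | 0 => st'
    | k' + 1 => innerA row j k' sm' st'

-- body of 'for j in range(c)'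
def colStepA (row : List Int) (st : List (List Int) × Int × Bool) (j : Nat) :
    List (List Int) × Int × Bool :=
  innerA row j j 0 st

-- body of 'for i in range(r)'
def rowStepA (arr : List (List Int)) (c : Nat) (st : List (List Int) × Int × Bool) (i : Nat) :
    List (List Int) × Int × Bool :=
  (List.range c).foldl (colStepA (arr.getD i [])) st

def minimumSubmatrix (arr : List (List Int)) : Int :=
  let r := arr.length
  let c := (arr.getD 0 []).length   -- len(arr[0]); Python raises IndexError on arr = [] (outside Pre_)
  let dp := List.replicate c (List.replicate c 0)
  let st := (List.range r).foldl (rowStepA arr c) (dp, 0, false)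
  st.2.1

-- ===== PORT B =====
-- state of the innermost loop: (colsum, run, best)
def stepB (row : List Int) (st : List Int × Int × Option Int) (j : Nat) :
    List Int × Int × Option Int :=
  let (colsum, run, best) := st
  let colsum' := colsum.set j (colsum.getD j 0 + row.getD j 0)   -- colsum[j] += row[j]
  let run' := min run 0 + colsum'.getD j 0
  let best' : Option Int :=
    match best with
    | none => some run'
    | some m => if run' < m then some run' else some m
  (colsum', run', best')

-- body of 'for b in range(t, len(arr))'
def midStepB (arr : List (List Int)) (c : Nat) (st : List Int × Option Int) (b : Nat) :
    List Int × Option Int :=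
  let (colsum, best) := st
  let res := (List.range c).foldl (stepB (arr.getD b [])) (colsum, 0, best)
  (res.1, res.2.2)

-- body of 'for t in range(len(arr))'
def topStepB (arr : List (List Int)) (c : Nat) (best : Option Int) (t : Nat) : Option Int :=
  ((List.range' t (arr.length - t)).foldl (midStepB arr c) (List.replicate c 0, best)).2

def minimumSubmatrix_alt (arr : List (List Int)) : Int :=
  let c := (arr.getD 0 []).length   -- len(arr[0]); Python raises IndexError on arr = [] (outside Pre_)
  let best := (List.range arr.length).foldl (topStepB arr c) none
  match best with
  | none => 0
  | some m => m

-- ===== PRECONDITION & SPEC =====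
-- Pre_ excludes exactly the inputs where Python A raises IndexError: the empty matrix
-- (len(arr[0])) and matrices with a row shorter than row 0 (arr[i][k] with k < len(arr[0])).
def Pre_minimumSubmatrix (arr : List (List Int)) : Prop :=
  arr ≠ [] ∧ ∀ row ∈ arr, (arr.getD 0 []).length ≤ row.length
instance (arr : List (List Int)) : Decidable (Pre_minimumSubmatrix arr) := by
  unfold Pre_minimumSubmatrix; infer_instance

def pvWitness_minimumSubmatrix : List (List Int) := [[1, -2], [3, 4]]

def Spec_minimumSubmatrix (arr : List (List Int)) (out : Int) : Prop := out = minimumSubmatrix_alt arr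
instance (arr : List (List Int)) (out : Int) : Decidable (Spec_minimumSubmatrix arr out) := by
  unfold Spec_minimumSubmatrix; infer_instance

-- ===== CLAIM (what is proved, stated in full; the proofs are below) =====
def Claim_equal_minimumSubmatrix : Prop := ∀ (arr : List (List Int)), Dom_minimumSubmatrix arr → Pre_minimumSubmatrix arr → Spec_minimumSubmatrix arr (minimumSubmatrix arr)

-- ===== LEMMAS AND PROOFS =====

-- matrix entry arr[i][col] (0 outside; the invariants only ever use it where the ports read it)
def pvX (arr : List (List Int)) (i col : Nat) : Int := (arr.getD i []).getD col 0

-- sum of row i over columns k..j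
def pvV (arr : List (List Int)) (k j i : Nat) : Int :=
  ∑ col ∈ Finset.Ico k (j + 1), pvX arr i col

-- column sum over rows t..b-1
def pvCS (arr : List (List Int)) (t b col : Nat) : Int :=
  ∑ i ∈ Finset.Ico t b, pvX arr i col

-- rectangle sum, rows t..b-1, columns k..j
def pvS (arr : List (List Int)) (t b k j : Nat) : Int :=
  ∑ i ∈ Finset.Ico t b, pvV arr k j i

-- min-Kadane recurrence: pvKad f n = min over m ≤ n of ∑_{i∈[m,n]} f i
def pvKad (f : Nat → Int) : Nat → Int
  | 0 => f 0
  | n + 1 => min 0 (pvKad f n) + f (n + 1)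

-- A's dp cell for column pair (k,j) after i rows, and the tmp value at row i
def pvDp (arr : List (List Int)) (k j : Nat) : Nat → Int
  | 0 => 0
  | i + 1 => min 0 (pvDp arr k j i + pvV arr k j i)

def pvTmp (arr : List (List Int)) (k j i : Nat) : Int := pvDp arr k j i + pvV arr k j i

-- candidate values: sums of all non-empty submatrices
def pvCand (arr : List (List Int)) (y : Int) : Prop :=
  ∃ t b k j, t < b ∧ b ≤ arr.length ∧ k ≤ j ∧ j < (arr.getD 0 []).length ∧ y = pvS arr t b k j

def pvIsMin (P : Int → Prop) (m : Int) : Prop := P m ∧ ∀ y, P y → m ≤ y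

-- invariant of A's (mn, init) accumulator over the set P of processed tmp values
def pvAInv (mn : Int) (init : Bool) (P : Int → Prop) : Prop :=
  if init then pvIsMin P mn else (mn = 0 ∧ ∀ y, ¬ P y)

-- invariant of B's Optional best over the set P of processed run values
def pvOInv : Option Int → (Int → Prop) → Prop
  | none, P => ∀ y, ¬ P y
  | some m, P => pvIsMin P m

def pvShape (c : Nat) (dp : List (List Int)) : Prop :=
  dp.length = c ∧ ∀ row ∈ dp, row.length = c

theorem pvIsMin_unique (P : Int → Prop) (m m' : Int) (h : pvIsMin P m) (h' : pvIsMin P m') : m = m' := by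
  exact le_antisymm (h.2 m' h'.1) (h'.2 m h.1)

-- getD/set helpers
theorem pv_getD_set_self {α : Type} (l : List α) (i : Nat) (v d : α) (h : i < l.length) :
    (l.set i v).getD i d = v := by
  simp [List.getD_eq_getElem?_getD, List.getElem?_set_self h]

theorem pv_getD_set_ne {α : Type} (l : List α) (i j : Nat) (v d : α) (h : i ≠ j) :
    (l.set i v).getD j d = l.getD j d := by
  simp [List.getD_eq_getElem?_getD, List.getElem?_set_ne h]

theorem pvShape_row_len (c : Nat) (dp : List (List Int)) (k : Nat)
    (h : pvShape c dp) (hk : k < c) : (dp.getD k []).length = c := by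
  obtain ⟨hl, hr⟩ := h
  have hk' : k < dp.length := by omega
  have : dp.getD k [] = dp[k] := by
    simp [List.getD_eq_getElem?_getD, List.getElem?_eq_getElem hk']
  rw [this]
  exact hr _ (List.getElem_mem hk')

theorem pvShape_set (c : Nat) (dp : List (List Int)) (k j : Nat) (v : Int)
    (h : pvShape c dp) (hk : k < c) : pvShape c (dpSet dp k j v) := by
  obtain ⟨hl, hr⟩ := h
  refine ⟨by simp [dpSet, hl], ?_⟩
  intro row hrow
  rcases List.mem_or_eq_of_mem_set hrow with h' | h'
  · exact hr _ h'
  · subst h'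
    rw [List.length_set]
    exact pvShape_row_len c dp k ⟨hl, hr⟩ hk

theorem dpGet_dpSet_self (c : Nat) (dp : List (List Int)) (k j : Nat) (v : Int)
    (h : pvShape c dp) (hk : k < c) (hj : j < c) :
    dpGet (dpSet dp k j v) k j = v := by
  have hk' : k < dp.length := h.1 ▸ hk
  have hj' : j < (dp.getD k []).length := by rw [pvShape_row_len c dp k h hk]; exact hj
  unfold dpGet dpSet
  rw [pv_getD_set_self _ _ _ _ hk', pv_getD_set_self _ _ _ _ hj']

theorem dpGet_dpSet_ne (c : Nat) (dp : List (List Int)) (k j : Nat) (v : Int) (k' j' : Nat)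
    (h : pvShape c dp) (hk : k < c) (hne : ¬(k' = k ∧ j' = j)) :
    dpGet (dpSet dp k j v) k' j' = dpGet dp k' j' := by
  by_cases hkk : k' = k
  · subst hkk
    have hj' : j' ≠ j := fun hjj => hne ⟨rfl, hjj⟩
    have hk' : k' < dp.length := h.1 ▸ hk
    unfold dpGet dpSet
    rw [pv_getD_set_self _ _ _ _ hk', pv_getD_set_ne _ _ _ _ _ (fun hh => hj' hh.symm)]
  · unfold dpGet dpSet
    rw [pv_getD_set_ne _ _ _ _ _ (fun hh => hkk hh.symm)]

-- accumulator lemmas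
theorem pvAInv_congr (mn : Int) (init : Bool) (P Q : Int → Prop)
    (h : ∀ y, P y ↔ Q y) (hI : pvAInv mn init P) : pvAInv mn init Q := by
  cases init with
  | false =>
    simp only [pvAInv, if_neg Bool.false_ne_true] at hI ⊢
    exact ⟨hI.1, fun y hy => hI.2 y ((h y).mpr hy)⟩
  | true =>
    simp only [pvAInv, pvIsMin] at hI ⊢
    exact ⟨(h _).mp hI.1, fun y hy => hI.2 y ((h y).mpr hy)⟩

theorem pvAInv_step (mn t : Int) (init : Bool) (P : Int → Prop) (h : pvAInv mn init P) :
    pvAInv (if !init || t < mn then t else mn) (if !init || t < mn then true else init)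
      (fun y => P y ∨ y = t) := by
  by_cases hc : (!init || decide (t < mn)) = true
  · rw [if_pos hc, if_pos hc]
    cases init with
    | false =>
      simp only [pvAInv, if_neg Bool.false_ne_true] at h
      simp only [pvAInv, pvIsMin]
      exact ⟨Or.inr (by simp), fun y hy => by
        rcases hy with hy | hy
        · exact absurd hy (h.2 y)
        · omega⟩
    | true =>
      simp only [Bool.not_true, Bool.false_or, decide_eq_true_eq] at hc
      simp only [pvAInv, pvIsMin] at h
      simp only [pvAInv, pvIsMin]
      exact ⟨Or.inr (by simp), fun y hy => by
        rcases hy with hy | hy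
        · have := h.2 y hy; omega
        · omega⟩
  · rw [if_neg hc, if_neg hc]
    have hinit : init = true := by
      cases init with
      | false => simp at hc
      | true => rfl
    subst hinit
    simp only [Bool.not_true, Bool.false_or, decide_eq_true_eq] at hc
    simp only [pvAInv, pvIsMin] at h
    simp only [pvAInv, pvIsMin]
    exact ⟨Or.inl h.1, fun y hy => by
      rcases hy with hy | hy
      · exact h.2 y hy
      · omega⟩

theorem pvOInv_congr (o : Option Int) (P Q : Int → Prop)
    (h : ∀ y, P y ↔ Q y) (hI : pvOInv o P) : pvOInv o Q := by
  cases o with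
  | none => exact fun y hy => hI y ((h y).mpr hy)
  | some m => exact ⟨(h _).mp hI.1, fun y hy => hI.2 y ((h y).mpr hy)⟩

-- Kadane lemmas
theorem pvKad_le (f : Nat → Int) : ∀ n m, m ≤ n → pvKad f n ≤ ∑ i ∈ Finset.Ico m (n + 1), f i := by
  intro n
  induction n with
  | zero =>
    intro m hm
    have : m = 0 := by omega
    subst this
    simp [pvKad]
  | succ n ih =>
    intro m hm
    rcases Nat.lt_or_ge m (n + 1) with h | h
    · rw [Finset.sum_Ico_succ_top (by omega)]
      have h1 := ih m (by omega)
      have h2 : min 0 (pvKad f n) ≤ pvKad f n := min_le_right _ _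
      simp only [pvKad]
      omega
    · have hm' : m = n + 1 := by omega
      subst hm'
      rw [Finset.sum_Ico_succ_top (by omega)]
      simp only [Finset.Ico_self, Finset.sum_empty, zero_add, pvKad]
      have h2 : min 0 (pvKad f n) ≤ 0 := min_le_left _ _
      omega

theorem pvKad_mem (f : Nat → Int) : ∀ n, ∃ m, m ≤ n ∧ pvKad f n = ∑ i ∈ Finset.Ico m (n + 1), f i := by
  intro n
  induction n with
  | zero =>
    exact ⟨0, le_refl 0, by simp [pvKad]⟩
  | succ n ih =>
    rcases le_total (pvKad f n) 0 with h | h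
    · obtain ⟨m, hm, he⟩ := ih
      refine ⟨m, by omega, ?_⟩
      rw [Finset.sum_Ico_succ_top (by omega), ← he]
      simp [pvKad, min_eq_right h]
    · refine ⟨n + 1, le_refl _, ?_⟩
      rw [Finset.sum_Ico_succ_top (by omega)]
      simp [pvKad, min_eq_left h]

theorem pvTmp_eq_kad (arr : List (List Int)) (k j : Nat) :
    ∀ i, pvTmp arr k j i = pvKad (fun i => pvV arr k j i) i := by
  intro i
  induction i with
  | zero => simp [pvTmp, pvDp, pvKad]
  | succ n ih =>
    simp only [pvTmp, pvDp, pvKad]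
    rw [← ih]
    rfl

theorem pvS_eq_sum_CS (arr : List (List Int)) (t b k j : Nat) :
    pvS arr t b k j = ∑ col ∈ Finset.Ico k (j + 1), pvCS arr t b col := by
  simp only [pvS, pvV, pvCS]
  exact Finset.sum_comm

-- invariant of A's innermost loop (k from j down to 0) at row i, column j
theorem innerA_inv (arr : List (List Int)) (c i j : Nat) (hj : j < c) :
    ∀ k, k ≤ j → ∀ dp mn init (P : Int → Prop),
      pvShape c dp →
      (∀ k', k' ≤ k → dpGet dp k' j = pvDp arr k' j i) →
      pvAInv mn init P →
      ∃ dp2 mn2 init2,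
        innerA (arr.getD i []) j k (∑ col ∈ Finset.Ico (k + 1) (j + 1), pvX arr i col)
            (dp, mn, init) = (dp2, mn2, init2) ∧
        pvShape c dp2 ∧
        (∀ k' j', dpGet dp2 k' j' =
            if j' = j ∧ k' ≤ k then min 0 (pvTmp arr k' j i) else dpGet dp k' j') ∧
        pvAInv mn2 init2 (fun y => P y ∨ ∃ k', k' ≤ k ∧ y = pvTmp arr k' j i) := by
  intro k
  induction k with
  | zero =>
    intro _ dp mn init P hsh hget hAI
    have hsm : (∑ col ∈ Finset.Ico (0 + 1) (j + 1), pvX arr i col) + (arr.getD i []).getD 0 0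
        = pvV arr 0 j i := by
      have h1 : (∑ col ∈ Finset.Ico 0 (j + 1), pvX arr i col)
          = pvX arr i 0 + ∑ col ∈ Finset.Ico (0 + 1) (j + 1), pvX arr i col :=
        Finset.sum_eq_sum_Ico_succ_bot (by omega) _
      have h2 : (arr.getD i []).getD 0 0 = pvX arr i 0 := rfl
      simp only [pvV]
      rw [h1, h2]
      ring
    have htmp : dpGet dp 0 j + ((∑ col ∈ Finset.Ico (0 + 1) (j + 1), pvX arr i col)
        + (arr.getD i []).getD 0 0) = pvTmp arr 0 j i := by
      rw [hsm, hget 0 (le_refl 0)]; rfl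
    simp only [innerA]
    rw [htmp]
    have hstep := pvAInv_step mn (pvTmp arr 0 j i) init P hAI
    by_cases hc : (!init || decide (pvTmp arr 0 j i < mn)) = true
    · simp only [if_pos hc] at hstep ⊢
      refine ⟨_, _, _, rfl, pvShape_set c dp 0 j _ hsh (by omega), ?_, ?_⟩
      · intro k' j'
        by_cases hcase : j' = j ∧ k' ≤ 0
        · rw [if_pos hcase]
          obtain ⟨h1, h2⟩ := hcase
          have : k' = 0 := by omega
          subst this h1
          exact dpGet_dpSet_self c dp 0 j' _ hsh (by omega) hj
        · rw [if_neg hcase]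
          refine dpGet_dpSet_ne c dp 0 j _ k' j' hsh (by omega) ?_
          intro ⟨h1, h2⟩
          exact hcase ⟨h2, by omega⟩
      · refine pvAInv_congr _ _ _ _ ?_ hstep
        intro y
        constructor
        · rintro (hy | hy)
          · exact Or.inl hy
          · exact Or.inr ⟨0, le_refl 0, hy⟩
        · rintro (hy | ⟨k', hk', hy⟩)
          · exact Or.inl hy
          · have : k' = 0 := by omega
            subst this; exact Or.inr hy
    · simp only [if_neg hc] at hstep ⊢
      refine ⟨_, _, _, rfl, pvShape_set c dp 0 j _ hsh (by omega), ?_, ?_⟩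
      · intro k' j'
        by_cases hcase : j' = j ∧ k' ≤ 0
        · rw [if_pos hcase]
          obtain ⟨h1, h2⟩ := hcase
          have : k' = 0 := by omega
          subst this h1
          exact dpGet_dpSet_self c dp 0 j' _ hsh (by omega) hj
        · rw [if_neg hcase]
          refine dpGet_dpSet_ne c dp 0 j _ k' j' hsh (by omega) ?_
          intro ⟨h1, h2⟩
          exact hcase ⟨h2, by omega⟩
      · refine pvAInv_congr _ _ _ _ ?_ hstep
        intro y
        constructor
        · rintro (hy | hy)
          · exact Or.inl hy
          · exact Or.inr ⟨0, le_refl 0, hy⟩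
        · rintro (hy | ⟨k', hk', hy⟩)
          · exact Or.inl hy
          · have : k' = 0 := by omega
            subst this; exact Or.inr hy
  | succ k ih =>
    intro hkj dp mn init P hsh hget hAI
    have hsm : (∑ col ∈ Finset.Ico (k + 1 + 1) (j + 1), pvX arr i col)
        + (arr.getD i []).getD (k + 1) 0 = ∑ col ∈ Finset.Ico (k + 1) (j + 1), pvX arr i col := by
      have h1 : (∑ col ∈ Finset.Ico (k + 1) (j + 1), pvX arr i col)
          = pvX arr i (k + 1) + ∑ col ∈ Finset.Ico (k + 1 + 1) (j + 1), pvX arr i col :=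
        Finset.sum_eq_sum_Ico_succ_bot (by omega) _
      have h2 : (arr.getD i []).getD (k + 1) 0 = pvX arr i (k + 1) := rfl
      rw [h1, h2]
      ring
    have htmp : dpGet dp (k + 1) j + ((∑ col ∈ Finset.Ico (k + 1 + 1) (j + 1), pvX arr i col)
        + (arr.getD i []).getD (k + 1) 0) = pvTmp arr (k + 1) j i := by
      rw [hsm, hget (k + 1) (le_refl _)]; rfl
    simp only [innerA]
    rw [htmp, hsm]
    have hstep := pvAInv_step mn (pvTmp arr (k + 1) j i) init P hAI
    have hsh' : pvShape c (dpSet dp (k + 1) j (min 0 (pvTmp arr (k + 1) j i))) :=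
      pvShape_set c dp (k + 1) j _ hsh (by omega)
    have hget' : ∀ k', k' ≤ k →
        dpGet (dpSet dp (k + 1) j (min 0 (pvTmp arr (k + 1) j i))) k' j = pvDp arr k' j i := by
      intro k' hk'
      rw [dpGet_dpSet_ne c dp (k + 1) j _ k' j hsh (by omega) (by intro ⟨h1, _⟩; omega)]
      exact hget k' (by omega)
    have hselfnew : dpGet (dpSet dp (k + 1) j (min 0 (pvTmp arr (k + 1) j i))) (k + 1) j
        = min 0 (pvTmp arr (k + 1) j i) :=
      dpGet_dpSet_self c dp (k + 1) j _ hsh (by omega) hj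
    by_cases hc : (!init || decide (pvTmp arr (k + 1) j i < mn)) = true
    · simp only [if_pos hc] at hstep ⊢
      obtain ⟨dp2, mn2, init2, heq, hsh2, hget2, hAI2⟩ :=
        ih (by omega) _ _ _ _ hsh' hget' hstep
      refine ⟨dp2, mn2, init2, heq, hsh2, ?_, ?_⟩
      · intro k' j'
        rw [hget2 k' j']
        by_cases hcase : j' = j ∧ k' ≤ k + 1
        · rw [if_pos hcase]
          obtain ⟨h1, h2⟩ := hcase
          subst h1
          by_cases hc2 : k' ≤ k
          · rw [if_pos ⟨rfl, hc2⟩]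
          · have : k' = k + 1 := by omega
            subst this
            rw [if_neg (by intro ⟨_, h⟩; omega)]
            exact hselfnew
        · rw [if_neg hcase, if_neg (by intro ⟨h1, h2⟩; exact hcase ⟨h1, by omega⟩)]
          exact dpGet_dpSet_ne c dp (k + 1) j _ k' j' hsh (by omega)
            (by intro ⟨h1, h2⟩; exact hcase ⟨h2, by omega⟩)
      · refine pvAInv_congr _ _ _ _ ?_ hAI2
        intro y
        constructor
        · rintro ((hy | hy) | ⟨k', hk', hy⟩)
          · exact Or.inl hy
          · exact Or.inr ⟨k + 1, le_refl _, hy⟩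
          · exact Or.inr ⟨k', by omega, hy⟩
        · rintro (hy | ⟨k', hk', hy⟩)
          · exact Or.inl (Or.inl hy)
          · by_cases hc2 : k' ≤ k
            · exact Or.inr ⟨k', hc2, hy⟩
            · have : k' = k + 1 := by omega
              subst this
              exact Or.inl (Or.inr hy)
    · simp only [if_neg hc] at hstep ⊢
      obtain ⟨dp2, mn2, init2, heq, hsh2, hget2, hAI2⟩ :=
        ih (by omega) _ _ _ _ hsh' hget' hstep
      refine ⟨dp2, mn2, init2, heq, hsh2, ?_, ?_⟩
      · intro k' j'
        rw [hget2 k' j']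
        by_cases hcase : j' = j ∧ k' ≤ k + 1
        · rw [if_pos hcase]
          obtain ⟨h1, h2⟩ := hcase
          subst h1
          by_cases hc2 : k' ≤ k
          · rw [if_pos ⟨rfl, hc2⟩]
          · have : k' = k + 1 := by omega
            subst this
            rw [if_neg (by intro ⟨_, h⟩; omega)]
            exact hselfnew
        · rw [if_neg hcase, if_neg (by intro ⟨h1, h2⟩; exact hcase ⟨h1, by omega⟩)]
          exact dpGet_dpSet_ne c dp (k + 1) j _ k' j' hsh (by omega)
            (by intro ⟨h1, h2⟩; exact hcase ⟨h2, by omega⟩)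
      · refine pvAInv_congr _ _ _ _ ?_ hAI2
        intro y
        constructor
        · rintro ((hy | hy) | ⟨k', hk', hy⟩)
          · exact Or.inl hy
          · exact Or.inr ⟨k + 1, le_refl _, hy⟩
          · exact Or.inr ⟨k', by omega, hy⟩
        · rintro (hy | ⟨k', hk', hy⟩)
          · exact Or.inl (Or.inl hy)
          · by_cases hc2 : k' ≤ k
            · exact Or.inr ⟨k', hc2, hy⟩
            · have : k' = k + 1 := by omega
              subst this
              exact Or.inl (Or.inr hy)

-- invariant of A's column loop (j from 0 to n-1) at row i
theorem colsA_inv (arr : List (List Int)) (c i : Nat) :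
    ∀ n, n ≤ c → ∀ dp mn init (P : Int → Prop),
      pvShape c dp →
      (∀ k j', k ≤ j' → j' < c → dpGet dp k j' = pvDp arr k j' i) →
      pvAInv mn init P →
      ∃ dp2 mn2 init2,
        (List.range n).foldl (colStepA (arr.getD i [])) (dp, mn, init) = (dp2, mn2, init2) ∧
        pvShape c dp2 ∧
        (∀ k j', k ≤ j' → j' < c →
          dpGet dp2 k j' = if j' < n then pvDp arr k j' (i + 1) else pvDp arr k j' i) ∧
        pvAInv mn2 init2 (fun y => P y ∨ ∃ k j', k ≤ j' ∧ j' < n ∧ y = pvTmp arr k j' i) := by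
  intro n
  induction n with
  | zero =>
    intro _ dp mn init P hsh hget hAI
    refine ⟨dp, mn, init, rfl, hsh, ?_, ?_⟩
    · intro k j' hk hj'
      simp only [Nat.not_lt_zero, if_false]
      exact hget k j' hk hj'
    · refine pvAInv_congr _ _ _ _ ?_ hAI
      intro y
      constructor
      · exact Or.inl
      · rintro (hy | ⟨k, j', _, h0, _⟩)
        · exact hy
        · omega
  | succ n ih =>
    intro hn dp mn init P hsh hget hAI
    obtain ⟨dp2, mn2, init2, heq, hsh2, hget2, hAI2⟩ :=
      ih (by omega) dp mn init P hsh hget hAI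
    have hgetn : ∀ k', k' ≤ n → dpGet dp2 k' n = pvDp arr k' n i := by
      intro k' hk'
      rw [hget2 k' n hk' (by omega), if_neg (by omega)]
    have h0 : (∑ col ∈ Finset.Ico (n + 1) (n + 1), pvX arr i col) = 0 := by simp
    obtain ⟨dp3, mn3, init3, heq3, hsh3, hget3, hAI3⟩ :=
      innerA_inv arr c i n (by omega) n (le_refl n) dp2 mn2 init2 _ hsh2 hgetn hAI2
    rw [h0] at heq3
    refine ⟨dp3, mn3, init3, ?_, hsh3, ?_, ?_⟩
    · rw [List.range_succ, List.foldl_append, heq]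
      simpa [colStepA] using heq3
    · intro k j' hk hj'
      rw [hget3 k j']
      by_cases hcase : j' = n ∧ k ≤ n
      · rw [if_pos hcase, if_pos (by omega)]
        obtain ⟨h1, _⟩ := hcase
        subst h1
        simp [pvDp, pvTmp]
      · rw [if_neg hcase, hget2 k j' hk hj']
        by_cases hlt : j' < n
        · rw [if_pos hlt, if_pos (by omega)]
        · rw [if_neg hlt, if_neg (by omega)]
    · refine pvAInv_congr _ _ _ _ ?_ hAI3
      intro y
      constructor
      · rintro ((hy | ⟨k, j', hkj, hj', hy⟩) | ⟨k', hk', hy⟩)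
        · exact Or.inl hy
        · exact Or.inr ⟨k, j', hkj, by omega, hy⟩
        · exact Or.inr ⟨k', n, hk', by omega, hy⟩
      · rintro (hy | ⟨k, j', hkj, hj', hy⟩)
        · exact Or.inl (Or.inl hy)
        · by_cases hlt : j' < n
          · exact Or.inl (Or.inr ⟨k, j', hkj, hlt, hy⟩)
          · have : j' = n := by omega
            subst this
            exact Or.inr ⟨k, hkj, hy⟩

-- invariant of A's row loop
theorem rowsA_inv (arr : List (List Int)) (c : Nat) :
    ∀ n, ∃ dp2 mn2 init2,
      (List.range n).foldl (rowStepA arr c)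
          (List.replicate c (List.replicate c 0), 0, false) = (dp2, mn2, init2) ∧
      pvShape c dp2 ∧
      (∀ k j', k ≤ j' → j' < c → dpGet dp2 k j' = pvDp arr k j' n) ∧
      pvAInv mn2 init2
        (fun y => ∃ i k j, i < n ∧ k ≤ j ∧ j < c ∧ y = pvTmp arr k j i) := by
  intro n
  induction n with
  | zero =>
    refine ⟨_, _, _, rfl, ?_, ?_, ?_⟩
    · exact ⟨by simp, fun row hrow => by
        rw [List.eq_of_mem_replicate hrow]; simp⟩
    · intro k j' _ hj'
      have hk' : k < c := by omega
      simp only [dpGet, List.getD_replicate _ hk', List.getD_replicate _ hj']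
      simp [pvDp]
    · simp only [pvAInv, if_neg Bool.false_ne_true]
      exact ⟨by simp, by rintro y ⟨i, k, j, hi, _⟩; omega⟩
  | succ n ih =>
    obtain ⟨dp2, mn2, init2, heq, hsh2, hget2, hAI2⟩ := ih
    obtain ⟨dp3, mn3, init3, heq3, hsh3, hget3, hAI3⟩ :=
      colsA_inv arr c n c (le_refl c) dp2 mn2 init2 _ hsh2 hget2 hAI2
    refine ⟨dp3, mn3, init3, ?_, hsh3, ?_, ?_⟩
    · rw [List.range_succ, List.foldl_append, heq]
      simpa [rowStepA] using heq3
    · intro k j' hk hj'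
      rw [hget3 k j' hk hj', if_pos hj']
    · refine pvAInv_congr _ _ _ _ ?_ hAI3
      intro y
      constructor
      · rintro (⟨i, k, j, hi, hkj, hj, hy⟩ | ⟨k, j', hkj, hj', hy⟩)
        · exact ⟨i, k, j, by omega, hkj, hj, hy⟩
        · exact ⟨n, k, j', by omega, hkj, hj', hy⟩
      · rintro ⟨i, k, j, hi, hkj, hj, hy⟩
        by_cases hlt : i < n
        · exact Or.inl ⟨i, k, j, hlt, hkj, hj, hy⟩
        · have : i = n := by omega
          subst this
          exact Or.inr ⟨k, j, hkj, hj, hy⟩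

-- A's result is the (mn, init) accumulator over all tmp values
theorem A_char (arr : List (List Int)) :
    ∃ mn init, minimumSubmatrix arr = mn ∧
      pvAInv mn init (fun y => ∃ i k j, i < arr.length ∧ k ≤ j ∧
        j < (arr.getD 0 []).length ∧ y = pvTmp arr k j i) := by
  obtain ⟨dp2, mn2, init2, heq, _, _, hAI⟩ :=
    rowsA_inv arr ((arr.getD 0 []).length) arr.length
  refine ⟨mn2, init2, ?_, hAI⟩
  simp only [minimumSubmatrix, heq]

-- invariant of B's innermost loop (columns) while adding row b on top of rows t..b-1
theorem stepB_loop_inv (arr : List (List Int)) (c t b : Nat) (htb : t ≤ b) :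
    ∀ n, n ≤ c → ∀ colsum best (P : Int → Prop),
      colsum.length = c →
      (∀ j, j < c → colsum.getD j 0 = pvCS arr t b j) →
      pvOInv best P →
      ∃ cs2 run2 best2,
        (List.range n).foldl (stepB (arr.getD b [])) (colsum, 0, best) = (cs2, run2, best2) ∧
        cs2.length = c ∧
        (∀ j, j < c → cs2.getD j 0 = if j < n then pvCS arr t (b + 1) j else pvCS arr t b j) ∧
        (run2 = match n with
                | 0 => 0
                | m + 1 => pvKad (fun col => pvCS arr t (b + 1) col) m) ∧
        pvOInv best2 (fun y => P y ∨ ∃ j, j < n ∧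
          y = pvKad (fun col => pvCS arr t (b + 1) col) j) := by
  intro n
  induction n with
  | zero =>
    intro _ colsum best P hlen hget hOI
    refine ⟨colsum, 0, best, rfl, hlen, ?_, rfl, ?_⟩
    · intro j hj
      rw [if_neg (by omega)]
      exact hget j hj
    · refine pvOInv_congr _ _ _ ?_ hOI
      intro y
      constructor
      · exact Or.inl
      · rintro (hy | ⟨j, hj, _⟩)
        · exact hy
        · omega
  | succ n ih =>
    intro hn colsum best P hlen hget hOI
    obtain ⟨cs2, run2, best2, heq, hlen2, hget2, hrun2, hOI2⟩ :=
      ih (by omega) colsum best P hlen hget hOI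
    have hn' : n < c := by omega
    have hcsn : cs2.getD n 0 = pvCS arr t b n := by
      rw [hget2 n hn', if_neg (by omega)]
    have hnewval : cs2.getD n 0 + (arr.getD b []).getD n 0 = pvCS arr t (b + 1) n := by
      rw [hcsn]
      have h2 : (arr.getD b []).getD n 0 = pvX arr b n := rfl
      rw [h2, pvCS, pvCS, Finset.sum_Ico_succ_top htb]
    have hrun' : min run2 0 + pvCS arr t (b + 1) n
        = pvKad (fun col => pvCS arr t (b + 1) col) n := by
      cases n with
      | zero => rw [hrun2]; simp [pvKad]
      | succ m =>
        rw [hrun2]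
        simp only [pvKad]
        rw [min_comm]
    have hstepeq : stepB (arr.getD b []) (cs2, run2, best2) n
        = (cs2.set n (cs2.getD n 0 + (arr.getD b []).getD n 0),
           pvKad (fun col => pvCS arr t (b + 1) col) n,
           match best2 with
           | none => some (pvKad (fun col => pvCS arr t (b + 1) col) n)
           | some m => if pvKad (fun col => pvCS arr t (b + 1) col) n < m then
               some (pvKad (fun col => pvCS arr t (b + 1) col) n) else some m) := by
      simp only [stepB]
      rw [pv_getD_set_self _ _ _ _ (by omega), hnewval, hrun']
      cases best2 <;> rfl
    refine ⟨_, _, _, by rw [List.range_succ, List.foldl_append, heq]; exact hstepeq,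
      ?_, ?_, rfl, ?_⟩
    · simp [List.length_set, hlen2]
    · intro j hj
      by_cases hjn : j = n
      · subst hjn
        rw [pv_getD_set_self _ _ _ _ (by omega), if_pos (by omega)]
        exact hnewval
      · rw [pv_getD_set_ne _ _ _ _ _ (fun h => hjn h.symm), hget2 j hj]
        by_cases hlt : j < n
        · rw [if_pos hlt, if_pos (by omega)]
        · rw [if_neg hlt, if_neg (by omega)]
    · cases best2 with
      | none =>
        refine ⟨Or.inr ⟨n, by omega, rfl⟩, ?_⟩
        rintro y (hy | ⟨j, hj, hy⟩)
        · exact absurd (Or.inl hy) (hOI2 y)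
        · rcases Nat.lt_or_ge j n with h | h
          · exact absurd (Or.inr ⟨j, h, hy⟩) (hOI2 y)
          · have : j = n := by omega
            subst this
            omega
      | some m =>
        obtain ⟨hmem, hbd⟩ := hOI2
        show pvOInv (if pvKad (fun col => pvCS arr t (b + 1) col) n < m
            then some (pvKad (fun col => pvCS arr t (b + 1) col) n) else some m) _
        by_cases hlt : pvKad (fun col => pvCS arr t (b + 1) col) n < m
        · rw [if_pos hlt]
          refine ⟨Or.inr ⟨n, by omega, rfl⟩, ?_⟩
          rintro y (hy | ⟨j, hj, hy⟩)
          · have := hbd y (Or.inl hy); omega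
          · rcases Nat.lt_or_ge j n with h | h
            · have := hbd y (Or.inr ⟨j, h, hy⟩); omega
            · have : j = n := by omega
              subst this
              omega
        · rw [if_neg hlt]
          refine ⟨?_, ?_⟩
          · rcases hmem with h | ⟨j, hj, hy⟩
            · exact Or.inl h
            · exact Or.inr ⟨j, by omega, hy⟩
          · rintro y (hy | ⟨j, hj, hy⟩)
            · exact hbd y (Or.inl hy)
            · rcases Nat.lt_or_ge j n with h | h
              · exact hbd y (Or.inr ⟨j, h, hy⟩)
              · have : j = n := by omega
                subst this
                omega

-- invariant of B's bottom-row loop for a fixed top row t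
theorem midB_inv (arr : List (List Int)) (c t : Nat) :
    ∀ n, ∀ best (P : Int → Prop),
      pvOInv best P →
      ∃ cs2 best2,
        (List.range' t n).foldl (midStepB arr c) (List.replicate c 0, best) = (cs2, best2) ∧
        cs2.length = c ∧
        (∀ j, j < c → cs2.getD j 0 = pvCS arr t (t + n) j) ∧
        pvOInv best2 (fun y => P y ∨ ∃ b' j, b' < n ∧ j < c ∧
          y = pvKad (fun col => pvCS arr t (t + b' + 1) col) j) := by
  intro n
  induction n with
  | zero =>
    intro best P hOI
    refine ⟨_, _, rfl, by simp, ?_, ?_⟩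
    · intro j hj
      rw [List.getD_replicate _ hj]
      simp [pvCS]
    · refine pvOInv_congr _ _ _ ?_ hOI
      intro y
      constructor
      · exact Or.inl
      · rintro (hy | ⟨b', j, hb', _⟩)
        · exact hy
        · omega
  | succ n ih =>
    intro best P hOI
    obtain ⟨cs2, best2, heq, hlen2, hget2, hOI2⟩ := ih best P hOI
    obtain ⟨cs3, run3, best3, heq3, hlen3, hget3, _, hOI3⟩ :=
      stepB_loop_inv arr c t (t + n) (by omega) c (le_refl c) cs2 best2 _ hlen2 hget2 hOI2
    refine ⟨cs3, best3, ?_, hlen3, ?_, ?_⟩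
    · rw [List.range'_1_concat, List.foldl_append, heq]
      show midStepB arr c (cs2, best2) (t + n) = (cs3, best3)
      simp only [midStepB]
      rw [heq3]
    · intro j hj
      rw [hget3 j hj, if_pos hj]
      rfl
    · refine pvOInv_congr _ _ _ ?_ hOI3
      intro y
      constructor
      · rintro ((hy | ⟨b', j, hb', hj, hy⟩) | ⟨j, hj, hy⟩)
        · exact Or.inl hy
        · exact Or.inr ⟨b', j, by omega, hj, hy⟩
        · exact Or.inr ⟨n, j, by omega, hj, hy⟩
      · rintro (hy | ⟨b', j, hb', hj, hy⟩)
        · exact Or.inl (Or.inl hy)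
        · by_cases hlt : b' < n
          · exact Or.inl (Or.inr ⟨b', j, hlt, hj, hy⟩)
          · have : b' = n := by omega
            subst this
            exact Or.inr ⟨j, hj, hy⟩

-- invariant of B's top-row loop
theorem topB_inv (arr : List (List Int)) (c : Nat) :
    ∀ n, ∃ best2,
      (List.range n).foldl (topStepB arr c) none = best2 ∧
      pvOInv best2 (fun y => ∃ t b' j, t < n ∧ b' < arr.length - t ∧ j < c ∧
        y = pvKad (fun col => pvCS arr t (t + b' + 1) col) j) := by
  intro n
  induction n with
  | zero =>
    exact ⟨none, rfl, by rintro y ⟨t, b', j, ht, _⟩; omega⟩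
  | succ n ih =>
    obtain ⟨best2, heq, hOI⟩ := ih
    obtain ⟨cs3, best3, heq3, _, _, hOI3⟩ :=
      midB_inv arr c n (arr.length - n) best2 _ hOI
    refine ⟨best3, ?_, ?_⟩
    · rw [List.range_succ, List.foldl_append, heq]
      show topStepB arr c best2 n = best3
      simp only [topStepB]
      rw [heq3]
    · refine pvOInv_congr _ _ _ ?_ hOI3
      intro y
      constructor
      · rintro (⟨t, b', j, ht, hb', hj, hy⟩ | ⟨b', j, hb', hj, hy⟩)
        · exact ⟨t, b', j, by omega, hb', hj, hy⟩
        · exact ⟨n, b', j, by omega, hb', hj, hy⟩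
      · rintro ⟨t, b', j, ht, hb', hj, hy⟩
        by_cases hlt : t < n
        · exact Or.inl ⟨t, b', j, hlt, hb', hj, hy⟩
        · have : t = n := by omega
          subst this
          exact Or.inr ⟨b', j, hb', hj, hy⟩

-- B's result is the Optional-best accumulator over all run values
theorem B_char (arr : List (List Int)) :
    ∃ best, minimumSubmatrix_alt arr
        = (match best with | none => (0 : Int) | some m => m) ∧
      pvOInv best (fun y => ∃ t b' j, t < arr.length ∧ b' < arr.length - t ∧
        j < (arr.getD 0 []).length ∧
        y = pvKad (fun col => pvCS arr t (t + b' + 1) col) j) := by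
  obtain ⟨best2, heq, hOI⟩ := topB_inv arr ((arr.getD 0 []).length) arr.length
  refine ⟨best2, ?_, hOI⟩
  simp only [minimumSubmatrix_alt, heq]

-- A's accumulator, when non-degenerate, is the minimum of all submatrix sums
theorem A_isMin (arr : List (List Int)) (mn : Int) (init : Bool)
    (hr : 0 < arr.length) (hc : 0 < (arr.getD 0 []).length)
    (hAI : pvAInv mn init (fun y => ∃ i k j, i < arr.length ∧ k ≤ j ∧
      j < (arr.getD 0 []).length ∧ y = pvTmp arr k j i)) :
    pvIsMin (pvCand arr) mn := by
  have hinit : init = true := by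
    cases init with
    | true => rfl
    | false =>
      exfalso
      simp only [pvAInv, if_neg Bool.false_ne_true] at hAI
      exact hAI.2 (pvTmp arr 0 0 0) ⟨0, 0, 0, hr, le_refl 0, hc, rfl⟩
  subst hinit
  simp only [pvAInv] at hAI
  obtain ⟨⟨i, k, j, hi, hkj, hj, hy⟩, hbd⟩ := hAI
  constructor
  · -- mn is itself a submatrix sum
    rw [hy, pvTmp_eq_kad]
    obtain ⟨m, hm, he⟩ := pvKad_mem (fun i => pvV arr k j i) i
    exact ⟨m, i + 1, k, j, by omega, by omega, hkj, hj, by rw [he]; rfl⟩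
  · -- mn is a lower bound of all submatrix sums
    rintro y ⟨t, b, k', j', htb, hbr, hkj', hj', hy'⟩
    obtain ⟨b0, rfl⟩ : ∃ b0, b = b0 + 1 := ⟨b - 1, by omega⟩
    have h1 : mn ≤ pvTmp arr k' j' b0 :=
      hbd _ ⟨b0, k', j', by omega, hkj', hj', rfl⟩
    have h2 : pvTmp arr k' j' b0 ≤ pvS arr t (b0 + 1) k' j' := by
      rw [pvTmp_eq_kad]
      exact pvKad_le _ b0 t (by omega)
    rw [hy']
    exact le_trans h1 h2

-- B's accumulator, when non-degenerate, is the minimum of all submatrix sums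
theorem B_isMin (arr : List (List Int)) (m : Int)
    (hOI : pvOInv (some m) (fun y => ∃ t b' j, t < arr.length ∧ b' < arr.length - t ∧
      j < (arr.getD 0 []).length ∧
      y = pvKad (fun col => pvCS arr t (t + b' + 1) col) j)) :
    pvIsMin (pvCand arr) m := by
  obtain ⟨⟨t, b', j, ht, hb', hj, hy⟩, hbd⟩ := hOI
  constructor
  · rw [hy]
    obtain ⟨k, hk, he⟩ := pvKad_mem (fun col => pvCS arr t (t + b' + 1) col) j
    refine ⟨t, t + b' + 1, k, j, by omega, by omega, hk, hj, ?_⟩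
    rw [he, pvS_eq_sum_CS]
  · rintro y ⟨t', b, k, j', htb, hbr, hkj, hj', hy'⟩
    have hbw : t' < arr.length := by omega
    have h1 : m ≤ pvKad (fun col => pvCS arr t' (t' + (b - t' - 1) + 1) col) j' :=
      hbd _ ⟨t', b - t' - 1, j', hbw, by omega, hj', rfl⟩
    have hbe : t' + (b - t' - 1) + 1 = b := by omega
    rw [hbe] at h1
    have h2 : pvKad (fun col => pvCS arr t' b col) j' ≤ pvS arr t' b k j' := by
      rw [pvS_eq_sum_CS]
      exact pvKad_le _ j' k hkj
    rw [hy']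
    exact le_trans h1 h2

theorem AB_eq (arr : List (List Int)) : minimumSubmatrix arr = minimumSubmatrix_alt arr := by
  obtain ⟨mn, init, hA, hAI⟩ := A_char arr
  obtain ⟨best, hB, hOI⟩ := B_char arr
  by_cases hdeg : (arr.getD 0 []).length = 0 ∨ arr.length = 0
  · -- no submatrix exists: both return 0
    have hmn : mn = 0 := by
      cases init with
      | false => simpa [pvAInv] using hAI.1
      | true =>
        exfalso
        simp only [pvAInv] at hAI
        obtain ⟨⟨i, k, j, hi, _, hj, _⟩, _⟩ := hAI
        omega
    have hbest : best = none := by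
      cases best with
      | none => rfl
      | some m =>
        exfalso
        obtain ⟨⟨t, b', j, ht, hb', hj, _⟩, _⟩ := hOI
        omega
    rw [hA, hB, hmn, hbest]
  · have hc : 0 < (arr.getD 0 []).length := Nat.pos_of_ne_zero fun h => hdeg (Or.inl h)
    have hr : 0 < arr.length := Nat.pos_of_ne_zero fun h => hdeg (Or.inr h)
    have hAmin : pvIsMin (pvCand arr) mn := A_isMin arr mn init hr hc hAI
    obtain ⟨m, rfl⟩ : ∃ m, best = some m := by
      cases best with
      | some m => exact ⟨m, rfl⟩
      | none =>
        exfalso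
        exact hOI (pvKad (fun col => pvCS arr 0 (0 + 0 + 1) col) 0)
          ⟨0, 0, 0, hr, by omega, hc, rfl⟩
    have hBmin : pvIsMin (pvCand arr) m := B_isMin arr m hOI
    rw [hA, hB]
    exact pvIsMin_unique _ _ _ hAmin hBmin

-- ===== VERDICT (by name: the statement is the Claim_ definition above) =====
theorem minimumSubmatrix_spec : Claim_equal_minimumSubmatrix := by
  intro arr _ _
  unfold Spec_minimumSubmatrix
  exact AB_eq arr
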